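-- pv_equiv track=rewrite | github.com/Tejas18k/big_data | pythonAssignement/assign23.py | sum_of_sqr
-- ===== SOURCE A (Python) =====
-- def sum_of_sqr(n):
--     sum = 0
--     original_n = n  # Store the original value of n
--     while n > 0:
--         rem = n % 10
--         sum += rem * rem
--         n //= 10
--     return sum == original_n
-- ===== SOURCE B (Python) =====
-- def sum_of_sqr(n):
--     # Idiomatic rewrite: read the digits off the decimal string instead of
--     # peeling them with % and //.  Negative n has no digit string, and A's
--     # digit-square sum (0) can never equal a negative n, so return False.
--     if n < 0:
--         return False
--     return sum((ord(d) - 48) ** 2 for d in str(n)) == n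
-- ===== Notes on version B (the rewrite author's own statement) =====
-- stated objective: idiomatic
-- what changed: B reads the digits from the decimal string str(n) and sums their squares in one generator expression instead of A's while loop peeling digits off with modulo and floor division.
import Mathlib
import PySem

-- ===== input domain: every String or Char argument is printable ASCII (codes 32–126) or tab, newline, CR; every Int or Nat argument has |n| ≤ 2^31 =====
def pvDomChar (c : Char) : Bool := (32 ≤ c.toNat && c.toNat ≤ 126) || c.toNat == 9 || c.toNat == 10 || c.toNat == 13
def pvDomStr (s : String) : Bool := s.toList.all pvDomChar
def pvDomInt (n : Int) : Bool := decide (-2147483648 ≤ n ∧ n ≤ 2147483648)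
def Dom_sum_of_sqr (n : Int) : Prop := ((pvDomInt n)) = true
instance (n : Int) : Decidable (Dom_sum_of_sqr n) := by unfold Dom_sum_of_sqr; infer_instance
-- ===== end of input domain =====

-- B reads the digits off str(n) with one generator-style fold instead of A's %/// peeling loop; same outputs (idiomatic, not faster).

-- ===== PORT A =====
-- the while loop: state (n, sum); returns the final sum
def pvLoopA (n sum : Int) : Int :=
  if n > 0 then
    let rem := PySem.Int.mod n 10
    pvLoopA (PySem.Int.floordiv n 10) (sum + rem * rem)
  else sum
termination_by n.toNat
decreasing_by
  rename_i h
  simp only [PySem.Int.floordiv]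
  rw [Int.fdiv_eq_ediv_of_nonneg _ (by norm_num)]
  obtain ⟨k, rfl⟩ := Int.eq_ofNat_of_zero_le h.le
  rw [show ((k : Int) / 10) = ((k / 10 : Nat) : Int) from by
    exact_mod_cast (Int.natCast_div k 10).symm]
  simp only [Int.toNat_natCast]
  exact Nat.div_lt_self (by exact_mod_cast h) (by norm_num)

def sum_of_sqr (n : Int) : Bool :=
  pvLoopA n 0 == n

-- ===== PORT B =====
def sum_of_sqr_alt (n : Int) : Bool :=
  if n < 0 then false
  else
    ((PySem.Int.toStr n).toList.foldl
      (fun acc d => acc + ((d.toNat : Int) - 48) ^ 2) 0) == n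

-- ===== PRECONDITION & SPEC =====
def Spec_sum_of_sqr (n : Int) (out : Bool) : Prop := out = sum_of_sqr_alt n
instance (n : Int) (out : Bool) : Decidable (Spec_sum_of_sqr n out) := by unfold Spec_sum_of_sqr; infer_instance

-- ===== CLAIM (what is proved, stated in full; the proofs are below) =====
def Claim_equal_sum_of_sqr : Prop := ∀ (n : Int), Dom_sum_of_sqr n → Spec_sum_of_sqr n (sum_of_sqr n)

-- ===== LEMMAS AND PROOFS =====

-- sum of squares of a digit list, as an Int
def pvSumSq (l : List Nat) : Int := (l.map (fun d : Nat => ((d : Int) ^ 2 : Int))).sum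

-- A's loop computes the digit-square sum of |n| for natural n
lemma pvLoopA_digits (m : Nat) : ∀ acc : Int,
    pvLoopA (m : Int) acc = acc + pvSumSq (Nat.digits 10 m) := by
  induction m using Nat.strong_induction_on with
  | _ m ih =>
    intro acc
    rw [pvLoopA]
    by_cases hm : 0 < m
    · have hgt : (m : Int) > 0 := by exact_mod_cast hm
      simp only [hgt, if_pos, PySem.Int.mod, PySem.Int.floordiv]
      rw [Int.fmod_eq_emod_of_nonneg _ (by norm_num), Int.fdiv_eq_ediv_of_nonneg _ (by norm_num)]
      rw [show ((m : Int) % 10) = ((m % 10 : Nat) : Int) by push_cast; ring_nf,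
          show ((m : Int) / 10) = ((m / 10 : Nat) : Int) by push_cast; ring_nf]
      rw [ih (m / 10) (Nat.div_lt_self hm (by norm_num))]
      rw [Nat.digits_def' (by norm_num : 1 < 10) hm]
      simp [pvSumSq]
      ring
    · have : ¬ ((m : Int) > 0) := by omega
      simp only [this, if_neg, not_false_iff]
      have : m = 0 := by omega
      subst this
      simp [pvSumSq]

-- the core of Nat.toDigits produces the reversed digit characters
lemma pvToDigitsCore_eq (fuel : Nat) : ∀ (n : Nat) (ds : List Char), 0 < n → n < fuel →
    Nat.toDigitsCore 10 fuel n ds = ((Nat.digits 10 n).map Nat.digitChar).reverse ++ ds := by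
  induction fuel with
  | zero => intro n ds hn hf; omega
  | succ f ih =>
    intro n ds hn hf
    rw [Nat.toDigitsCore]
    by_cases h0 : n / 10 = 0
    · simp only [h0, if_pos]
      have hlt : n < 10 := by
        by_contra hge
        have := Nat.div_le_div_right (c := 10) (Nat.le_of_not_lt hge)
        simp at this; omega
      rw [Nat.digits_def' (by norm_num : 1 < 10) hn, h0]
      simp
    · simp only [h0, if_neg, not_false_iff]
      rw [ih (n / 10) _ (Nat.pos_of_ne_zero h0)
            (by have := Nat.div_lt_self hn (by norm_num : 1 < 10); omega)]
      rw [Nat.digits_def' (by norm_num : 1 < 10) hn]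
      simp

-- folding the square-summing step over any char list = initial acc + mapped sum
lemma pvFoldl_sq (l : List Char) : ∀ acc : Int,
    l.foldl (fun acc d => acc + ((d.toNat : Int) - 48) ^ 2) acc
      = acc + (l.map (fun d => ((d.toNat : Int) - 48) ^ 2)).sum := by
  induction l with
  | nil => intro acc; simp
  | cons a t ih => intro acc; simp [List.foldl_cons, ih]; ring

-- for a decimal digit, the char value recovers the digit
lemma pvDigitChar_val (d : Nat) (hd : d < 10) :
    (((Nat.digitChar d).toNat : Int) - 48) ^ 2 = (d : Int) ^ 2 := by
  interval_cases d <;> decide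

-- B's fold over the digit characters of m equals the digit-square sum
lemma pvFold_digits (m : Nat) :
    ((((Nat.digits 10 m).map Nat.digitChar).reverse).map
        (fun d => ((d.toNat : Int) - 48) ^ 2)).sum = pvSumSq (Nat.digits 10 m) := by
  rw [List.map_reverse, List.sum_reverse, List.map_map]
  unfold pvSumSq
  refine congrArg List.sum (List.map_congr_left ?_)
  intro d hd
  exact pvDigitChar_val d (Nat.digits_lt_base (by norm_num) hd)

-- ===== VERDICT (by name: the statement is the Claim_ definition above) =====
theorem sum_of_sqr_spec : Claim_equal_sum_of_sqr := by
  intro n _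
  unfold Spec_sum_of_sqr sum_of_sqr sum_of_sqr_alt
  by_cases hneg : n < 0
  · rw [pvLoopA]
    have : ¬ (n > 0) := by omega
    simp only [this, if_neg, not_false_iff, hneg, if_pos]
    simp; omega
  · simp only [hneg, if_neg, not_false_iff]
    rw [PySem.Int.toList_toStr]
    have h0 : 0 ≤ n := by omega
    obtain ⟨m, rfl⟩ := Int.eq_ofNat_of_zero_le h0
    rw [show pvLoopA (m : Int) 0 = pvSumSq (Nat.digits 10 m) by
      simpa using pvLoopA_digits m 0]
    unfold PySem.Int.toChars
    have : ¬ ((m : Int) < 0) := by omega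
    simp only [this, if_neg, not_false_iff, Int.toNat_natCast]
    by_cases hm : 0 < m
    · rw [Nat.toDigits, pvToDigitsCore_eq (m + 1) m [] hm (by omega)]
      rw [List.append_nil, pvFoldl_sq, pvFold_digits m]
      simp
    · have : m = 0 := by omega
      subst this
      rw [show pvSumSq (Nat.digits 10 0) = 0 by simp [pvSumSq]]
      decide
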